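-- pv_equiv track=rewrite | github.com/andcut/colbran-polygenic-self-domestication | scripts/run_extension.py | resolve_aadr_iid
-- ===== SOURCE A (Python) =====
-- SAMPLE_ID_SUFFIXES = [
--     ".AG",
--     ".SG",
--     ".DG",
--     ".HO",
--     "_genotyping_noUDG",
--     "_genotyping",
--     "_in.preparation",
--     "_noUDG",
--     "_d",
-- ]
--
-- def clean_value(value: object) -> str:
--     return "" if value is None else str(value).strip()
--
-- def canonical_sample_id(value: str) -> str:
--     sample_id = clean_value(value)
--     changed = True
--     while changed:
--         changed = False
--         for suffix in SAMPLE_ID_SUFFIXES: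
--             if sample_id.endswith(suffix):
--                 sample_id = sample_id[: -len(suffix)]
--                 changed = True
--                 break
--     return sample_id.casefold()
--
-- def sample_candidate_score(original: str, candidate: str) -> int:
--     score = 0
--     if original.endswith(".SG") and candidate.endswith(".SG"):
--         score += 100
--     if original.endswith(".DG") and candidate.endswith(".DG"):
--         score += 50
--     if original.endswith(".AG") and candidate.endswith(".AG"):
--         score += 50
--     if "_d" in original and ("_d." in candidate or candidate.endswith(".DG")):
--         score += 25
--     if "_d" not in original and "_d." not in candidate:
--         score += 5
--     return score
--
-- def resolve_aadr_iid(
--     sample_iid: str,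
--     iid_to_index: dict[str, int],
--     canonical_to_ids: dict[str, list[str]],
-- ) -> tuple[int | None, str | None]:
--     if sample_iid in iid_to_index:
--         return iid_to_index[sample_iid], sample_iid
--     candidates = canonical_to_ids.get(canonical_sample_id(sample_iid), [])
--     if not candidates:
--         return None, None
--     if len(candidates) == 1:
--         candidate = candidates[0]
--         return iid_to_index[candidate], candidate
--     scored = sorted(
--         ((sample_candidate_score(sample_iid, candidate), candidate) for candidate in candidates),
--         reverse=True,
--     )
--     if len(scored) >= 2 and scored[0][0] == scored[1][0]:
--         return None, None
--     candidate = scored[0][1]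
--     return iid_to_index[candidate], candidate
-- ===== SOURCE B (Python) =====
-- SAMPLE_ID_SUFFIXES = [
--     ".AG",
--     ".SG",
--     ".DG",
--     ".HO",
--     "_genotyping_noUDG",
--     "_genotyping",
--     "_in.preparation",
--     "_noUDG",
--     "_d",
-- ]
--
-- def clean_value(value: object) -> str:
--     return "" if value is None else str(value).strip()
--
-- def canonical_sample_id(value: str) -> str:
--     sample_id = clean_value(value)
--     changed = True
--     while changed:
--         changed = False
--         for suffix in SAMPLE_ID_SUFFIXES:
--             if sample_id.endswith(suffix):
--                 sample_id = sample_id[: -len(suffix)]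
--                 changed = True
--                 break
--     return sample_id.casefold()
--
-- def sample_candidate_score(original: str, candidate: str) -> int:
--     score = 0
--     if original.endswith(".SG") and candidate.endswith(".SG"):
--         score += 100
--     if original.endswith(".DG") and candidate.endswith(".DG"):
--         score += 50
--     if original.endswith(".AG") and candidate.endswith(".AG"):
--         score += 50
--     if "_d" in original and ("_d." in candidate or candidate.endswith(".DG")):
--         score += 25
--     if "_d" not in original and "_d." not in candidate:
--         score += 5
--     return score
--
-- def resolve_aadr_iid(
--     sample_iid: str,
--     iid_to_index: dict[str, int],
--     canonical_to_ids: dict[str, list[str]],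
-- ) -> tuple[int | None, str | None]:
--     if sample_iid in iid_to_index:
--         return iid_to_index[sample_iid], sample_iid
--     candidates = canonical_to_ids.get(canonical_sample_id(sample_iid), [])
--     if not candidates:
--         return None, None
--     if len(candidates) == 1:
--         candidate = candidates[0]
--         return iid_to_index[candidate], candidate
--     # single linear pass instead of building and sorting the scored list
--     best = candidates[0]
--     best_score = sample_candidate_score(sample_iid, best)
--     at_best = 1
--     for candidate in candidates[1:]:
--         score = sample_candidate_score(sample_iid, candidate)
--         if score > best_score:
--             best_score, best, at_best = score, candidate, 1
--         elif score == best_score: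
--             at_best += 1
--     if at_best >= 2:
--         return None, None
--     return iid_to_index[best], best
-- ===== Notes on version B (the rewrite author's own statement) =====
-- stated objective: simpler
-- what changed: The build-then-sort of the scored candidate list (sorted(..., reverse=True) plus top-two inspection) is replaced by one linear scan that keeps the best score, the first candidate attaining it, and a count of how many candidates attain it; the fast paths are unchanged.
import Mathlib
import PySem

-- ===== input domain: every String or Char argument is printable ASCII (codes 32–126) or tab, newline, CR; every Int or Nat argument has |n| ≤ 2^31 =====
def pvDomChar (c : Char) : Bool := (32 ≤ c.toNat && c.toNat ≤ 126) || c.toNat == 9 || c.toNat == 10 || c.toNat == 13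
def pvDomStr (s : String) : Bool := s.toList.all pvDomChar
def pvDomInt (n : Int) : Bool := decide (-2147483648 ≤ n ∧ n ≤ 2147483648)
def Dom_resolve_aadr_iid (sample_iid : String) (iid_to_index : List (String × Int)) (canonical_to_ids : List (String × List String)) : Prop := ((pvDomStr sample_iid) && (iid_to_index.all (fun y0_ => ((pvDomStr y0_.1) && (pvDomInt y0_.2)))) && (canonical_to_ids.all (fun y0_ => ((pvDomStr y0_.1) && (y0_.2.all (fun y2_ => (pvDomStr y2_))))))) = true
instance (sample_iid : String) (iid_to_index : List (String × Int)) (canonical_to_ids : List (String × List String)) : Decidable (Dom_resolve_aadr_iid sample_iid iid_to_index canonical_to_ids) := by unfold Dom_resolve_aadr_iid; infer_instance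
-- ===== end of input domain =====

-- B replaces A's build-and-sort of the scored candidate list by a single linear scan keeping
-- (best score, first best candidate, how many candidates attain the best score); same results.
-- (Python `str.casefold` is ported as PySem.Chars.lower — identical on the ASCII domain Dom.)

-- ===== PORT A =====
-- module constant SAMPLE_ID_SUFFIXES
def pvSuffixes : List (List Char) :=
  [".AG".toList, ".SG".toList, ".DG".toList, ".HO".toList, "_genotyping_noUDG".toList,
   "_genotyping".toList, "_in.preparation".toList, "_noUDG".toList, "_d".toList]

theorem pvSuffixes_pos : ∀ suf ∈ pvSuffixes, 0 < suf.length := by decide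

-- the `while changed:` loop of canonical_sample_id: strip the first matching suffix and repeat
def pvStripLoop (s : List Char) : List Char :=
  match h : pvSuffixes.find? (fun suf => PySem.Chars.endswith s suf) with
  | none => s
  | some suf => pvStripLoop (s.take (s.length - suf.length))
termination_by s.length
decreasing_by
  have hmem := List.mem_of_find?_eq_some h
  have hend := List.find?_some h
  have hpos := pvSuffixes_pos suf hmem
  have hsuffix : suf <:+ s := (PySem.Chars.endswith_iff s suf).mp hend
  have hle : suf.length ≤ s.length := hsuffix.length_le
  simp only [List.length_take]
  omega

-- canonical_sample_id (clean_value on a str is .strip(); .casefold() = lower on ASCII)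
def pvCanonical (value : String) : List Char :=
  PySem.Chars.lower (pvStripLoop (PySem.Chars.strip value.toList))

-- sample_candidate_score
def pvScore (original candidate : List Char) : Int :=
  (if PySem.Chars.endswith original ".SG".toList && PySem.Chars.endswith candidate ".SG".toList then (100 : Int) else 0)
  + (if PySem.Chars.endswith original ".DG".toList && PySem.Chars.endswith candidate ".DG".toList then (50 : Int) else 0)
  + (if PySem.Chars.endswith original ".AG".toList && PySem.Chars.endswith candidate ".AG".toList then (50 : Int) else 0)
  + (if PySem.Chars.isIn "_d".toList original &&
        (PySem.Chars.isIn "_d.".toList candidate || PySem.Chars.endswith candidate ".DG".toList) then (25 : Int) else 0)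
  + (if !PySem.Chars.isIn "_d".toList original && !PySem.Chars.isIn "_d.".toList candidate then (5 : Int) else 0)

-- A builds the scored list and sorts it descending (tuple comparison), then inspects the top two.
def resolve_aadr_iid (sample_iid : String) (iid_to_index : List (String × Int)) (canonical_to_ids : List (String × List String)) : Option Int × Option String :=
  match (PySem.Dict.mk iid_to_index).get? sample_iid with
  | some idx => (some idx, some sample_iid)
  | none =>
    match (PySem.Dict.mk canonical_to_ids).getD (String.ofList (pvCanonical sample_iid)) [] with
    | [] => (none, none)
    | [candidate] => ((PySem.Dict.mk iid_to_index).get? candidate, some candidate)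
    | candidates =>
      let scored := PySem.List.sorted2
        (candidates.map (fun c => (pvScore sample_iid.toList c.toList, c)))
        (fun p => p.1) (fun p => p.2) true
      match scored with
      | (s0, c0) :: (s1, _) :: _ =>
        if s0 = s1 then (none, none)
        else ((PySem.Dict.mk iid_to_index).get? c0, some c0)
      | _ => (none, none)   -- unreachable: scored is a permutation of ≥ 2 pairs

-- ===== PORT B =====
-- the linear scan of Source B: state (best_score, best, at_best)
def pvScan (orig : List Char) : List String → Int × String × Int → Int × String × Int
  | [], st => st
  | c :: cs, (b, bc, n) =>
      let s := pvScore orig c.toList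
      if b < s then pvScan orig cs (s, c, 1)
      else if s = b then pvScan orig cs (b, bc, n + 1)
      else pvScan orig cs (b, bc, n)

def resolve_aadr_iid_alt (sample_iid : String) (iid_to_index : List (String × Int)) (canonical_to_ids : List (String × List String)) : Option Int × Option String :=
  if (PySem.Dict.mk iid_to_index).contains sample_iid then
    ((PySem.Dict.mk iid_to_index).get? sample_iid, some sample_iid)
  else
    match (PySem.Dict.mk canonical_to_ids).getD (String.ofList (pvCanonical sample_iid)) [] with
    | [] => (none, none)
    | c0 :: cs =>
      if cs = [] then ((PySem.Dict.mk iid_to_index).get? c0, some c0)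
      else
        let st := pvScan sample_iid.toList cs (pvScore sample_iid.toList c0.toList, c0, 1)
        if 2 ≤ st.2.2 then (none, none)
        else ((PySem.Dict.mk iid_to_index).get? st.2.1, some st.2.1)

-- ===== PRECONDITION & SPEC =====
-- the maximum candidate score (scores are non-negative, so 0 is a neutral seed)
def pvMaxScore (sample_iid : String) (cands : List String) : Int :=
  (cands.map (fun c => pvScore sample_iid.toList c.toList)).foldr max 0

-- Pre_ is exactly the inputs on which Python A returns: it excludes only the inputs where
-- iid_to_index[candidate] raises KeyError (the looked-up candidate — the single one, or the
-- unique top-scoring one — is missing from iid_to_index).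
def Pre_resolve_aadr_iid (sample_iid : String) (iid_to_index : List (String × Int)) (canonical_to_ids : List (String × List String)) : Prop :=
  sample_iid ∈ iid_to_index.map Prod.fst ∨
  (let cands := (PySem.Dict.mk canonical_to_ids).getD (String.ofList (pvCanonical sample_iid)) []
   (cands.length = 1 → ∀ c ∈ cands, c ∈ iid_to_index.map Prod.fst) ∧
   (2 ≤ cands.length →
     2 ≤ cands.countP (fun c => pvScore sample_iid.toList c.toList = pvMaxScore sample_iid cands) ∨
     ∀ c ∈ cands, pvScore sample_iid.toList c.toList = pvMaxScore sample_iid cands →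
       c ∈ iid_to_index.map Prod.fst))
instance (sample_iid : String) (iid_to_index : List (String × Int)) (canonical_to_ids : List (String × List String)) : Decidable (Pre_resolve_aadr_iid sample_iid iid_to_index canonical_to_ids) := by unfold Pre_resolve_aadr_iid; infer_instance

def pvWitness_resolve_aadr_iid : String × (List (String × Int)) × (List (String × List String)) :=
  ("S1.SG", [("S1.SG", 3), ("S1.DG", 4)], [("s1", ["S1.SG", "S1.DG"])])

def Spec_resolve_aadr_iid (sample_iid : String) (iid_to_index : List (String × Int)) (canonical_to_ids : List (String × List String)) (out : Option Int × Option String) : Prop := out = resolve_aadr_iid_alt sample_iid iid_to_index canonical_to_ids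
instance (sample_iid : String) (iid_to_index : List (String × Int)) (canonical_to_ids : List (String × List String)) (out : Option Int × Option String) : Decidable (Spec_resolve_aadr_iid sample_iid iid_to_index canonical_to_ids out) := by unfold Spec_resolve_aadr_iid; infer_instance

-- ===== CLAIM (what is proved, stated in full; the proofs are below) =====
def Claim_equal_resolve_aadr_iid : Prop := ∀ (sample_iid : String) (iid_to_index : List (String × Int)) (canonical_to_ids : List (String × List String)), Dom_resolve_aadr_iid sample_iid iid_to_index canonical_to_ids → Pre_resolve_aadr_iid sample_iid iid_to_index canonical_to_ids → Spec_resolve_aadr_iid sample_iid iid_to_index canonical_to_ids (resolve_aadr_iid sample_iid iid_to_index canonical_to_ids)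

-- ===== LEMMAS AND PROOFS =====

-- insertBy keeps a Pairwise-ordered list ordered, for a total boolean comparison
theorem pv_insertBy_pairwise {α : Type} (rel : α → α → Prop) (before : α → α → Bool)
    (h1 : ∀ a b, before a b = true → rel a b) (h2 : ∀ a b, before a b = false → rel b a)
    (htr : ∀ {a b c}, rel a b → rel b c → rel a c)
    (x : α) (l : List α) (hl : l.Pairwise rel) :
    (PySem.List.insertBy before x l).Pairwise rel := by
  induction l with
  | nil => simp [PySem.List.insertBy]
  | cons y ys ih =>
    rcases List.pairwise_cons.mp hl with ⟨hy, hys⟩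
    by_cases hb : before x y = true
    · rw [PySem.List.insertBy, if_pos hb]
      refine List.pairwise_cons.mpr ⟨?_, hl⟩
      intro z hz
      rcases List.mem_cons.mp hz with rfl | hz
      · exact h1 _ _ hb
      · exact htr (h1 _ _ hb) (hy z hz)
    · rw [PySem.List.insertBy, if_neg hb]
      refine List.pairwise_cons.mpr ⟨?_, ih hys⟩
      intro z hz
      rcases (PySem.List.mem_insertBy before x z ys).mp hz with rfl | hz
      · exact h2 _ _ (Bool.not_eq_true _ ▸ hb)
      · exact hy z hz

-- the first components of A's reverse-sorted scored list are non-increasing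
theorem pv_foldl_insertBy_pairwise {α : Type} (rel : α → α → Prop) (before : α → α → Bool)
    (h1 : ∀ a b, before a b = true → rel a b) (h2 : ∀ a b, before a b = false → rel b a)
    (htr : ∀ {a b c}, rel a b → rel b c → rel a c) :
    ∀ (ps acc : List α), acc.Pairwise rel →
      (ps.foldl (fun acc x => PySem.List.insertBy before x acc) acc).Pairwise rel := by
  intro ps
  induction ps with
  | nil => intro acc hp; simpa using hp
  | cons q qs ih =>
    intro acc hp
    simp only [List.foldl_cons]
    exact ih _ (pv_insertBy_pairwise rel before h1 h2 htr q acc hp)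

-- the first components of A's reverse-sorted scored list are non-increasing
theorem pv_sorted2_rev_fst_pairwise (ps : List (Int × String)) :
    (PySem.List.sorted2 ps (fun p => p.1) (fun p => p.2) true).Pairwise
      (fun a b : Int × String => b.1 ≤ a.1) := by
  have hdef : PySem.List.sorted2 ps (fun p => p.1) (fun p => p.2) true =
      ps.foldl (fun acc x => PySem.List.insertBy
        (fun a b : Int × String =>
          decide (b.1 < a.1) || (!decide (a.1 < b.1) && decide (b.2 < a.2))) x acc) [] := rfl
  rw [hdef]
  refine pv_foldl_insertBy_pairwise (fun a b : Int × String => b.1 ≤ a.1) _ ?_ ?_ (fun hab hbc => le_trans hbc hab) ps [] List.Pairwise.nil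
  · intro a b hab
    simp only [Bool.or_eq_true, Bool.and_eq_true, Bool.not_eq_eq_eq_not, Bool.not_true,
      decide_eq_true_eq, decide_eq_false_iff_not] at hab
    rcases hab with h | ⟨h, _⟩
    · exact le_of_lt h
    · exact not_lt.mp h
  · intro a b hab
    simp only [Bool.or_eq_false_iff] at hab
    exact not_lt.mp (of_decide_eq_false hab.1)

-- two distinct members both satisfying p force countP ≥ 2
theorem pv_two_le_countP {α : Type} (p : α → Bool) (L : List α) (x y : α)
    (hx : x ∈ L) (hy : y ∈ L) (hpx : p x) (hpy : p y) (hne : x ≠ y) :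
    2 ≤ L.countP p := by
  induction L with
  | nil => cases hx
  | cons z t ih =>
    rw [List.countP_cons]
    rcases List.mem_cons.mp hx with rfl | hx'
    · rcases List.mem_cons.mp hy with rfl | hy'
      · exact absurd rfl hne
      · have h0 : 0 < t.countP p := List.countP_pos_iff.mpr ⟨y, hy', hpy⟩
        rw [if_pos hpx]; omega
    · rcases List.mem_cons.mp hy with rfl | hy'
      · have h0 : 0 < t.countP p := List.countP_pos_iff.mpr ⟨x, hx', hpx⟩
        rw [if_pos hpy]; omega
      · exact le_trans (ih hx' hy') (by split <;> omega)

-- invariant of B's scan: (best score, a first witness, exact count of maximal candidates)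
theorem pvScan_inv (orig : List Char) (cs : List String) :
    ∀ (L : List String) (b : Int) (bc : String) (n : Int),
    (∀ x ∈ L, pvScore orig x.toList ≤ b) →
    bc ∈ L → pvScore orig bc.toList = b →
    n = (L.countP (fun x => pvScore orig x.toList = b) : Int) →
    (∀ x ∈ L ++ cs, pvScore orig x.toList ≤ (pvScan orig cs (b, bc, n)).1) ∧
    (pvScan orig cs (b, bc, n)).2.1 ∈ L ++ cs ∧
    pvScore orig (pvScan orig cs (b, bc, n)).2.1.toList = (pvScan orig cs (b, bc, n)).1 ∧
    (pvScan orig cs (b, bc, n)).2.2 =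
      ((L ++ cs).countP (fun x => pvScore orig x.toList = (pvScan orig cs (b, bc, n)).1) : Int) := by
  induction cs with
  | nil =>
    intro L b bc n hb hbc hsc hn
    simpa [pvScan] using ⟨hb, hbc, hsc, hn⟩
  | cons c cs ih =>
    intro L b bc n hb hbc hsc hn
    have hsplit : L ++ c :: cs = (L ++ [c]) ++ cs := by simp
    by_cases hlt : b < pvScore orig c.toList
    · have hstep : pvScan orig (c :: cs) (b, bc, n) = pvScan orig cs (pvScore orig c.toList, c, 1) := by
        simp [pvScan, hlt]
      rw [hstep, hsplit]
      refine ih (L ++ [c]) _ _ _ ?_ (by simp) rfl ?_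
      · intro x hx
        rcases List.mem_append.mp hx with hx | hx
        · exact le_of_lt (lt_of_le_of_lt (hb x hx) hlt)
        · simp at hx; subst hx; exact le_rfl
      · have hz : L.countP (fun x => pvScore orig x.toList = pvScore orig c.toList) = 0 := by
          refine List.countP_eq_zero.mpr ?_
          intro x hx
          have := hb x hx
          simp only [decide_eq_true_eq]
          omega
        simp [List.countP_append, hz]
    · by_cases heq : pvScore orig c.toList = b
      · have hstep : pvScan orig (c :: cs) (b, bc, n) = pvScan orig cs (b, bc, n + 1) := by
          simp [pvScan, heq]
        rw [hstep, hsplit]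
        refine ih (L ++ [c]) _ _ _ ?_ (by simp [hbc]) hsc ?_
        · intro x hx
          rcases List.mem_append.mp hx with hx | hx
          · exact hb x hx
          · simp at hx; subst hx; exact le_of_eq heq
        · rw [hn]
          simp [List.countP_append, heq]
      · have hstep : pvScan orig (c :: cs) (b, bc, n) = pvScan orig cs (b, bc, n) := by
          simp [pvScan, hlt, heq]
        rw [hstep, hsplit]
        refine ih (L ++ [c]) _ _ _ ?_ (by simp [hbc]) hsc ?_
        · intro x hx
          rcases List.mem_append.mp hx with hx | hx
          · exact hb x hx
          · simp at hx; subst hx; omega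
        · rw [hn]
          simp [List.countP_append, heq]

-- the core branch equality: sort-and-inspect equals the linear scan, on ≥ 2 candidates
theorem pv_branch_eq (orig : String) (c0 c1 : String) (cs : List String)
    (k : String → Option Int) :
    (match PySem.List.sorted2 ((c0 :: c1 :: cs).map (fun c => (pvScore orig.toList c.toList, c)))
        (fun p => p.1) (fun p => p.2) true with
      | (s0, d0) :: (s1, _) :: _ =>
        if s0 = s1 then ((none : Option Int), (none : Option String)) else (k d0, some d0)
      | _ => (none, none)) =
    (if 2 ≤ (pvScan orig.toList (c1 :: cs) (pvScore orig.toList c0.toList, c0, 1)).2.2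
      then ((none : Option Int), (none : Option String))
      else (k (pvScan orig.toList (c1 :: cs) (pvScore orig.toList c0.toList, c0, 1)).2.1,
            some (pvScan orig.toList (c1 :: cs) (pvScore orig.toList c0.toList, c0, 1)).2.1)) := by
  set f : String → Int := fun c => pvScore orig.toList c.toList with hf
  set LL : List String := c0 :: c1 :: cs with hLL
  set ps : List (Int × String) := LL.map (fun c => (f c, c)) with hps
  set scored := PySem.List.sorted2 ps (fun p => p.1) (fun p => p.2) true with hscored
  have hperm : scored.Perm ps := PySem.List.sorted2_perm ps _ _ true
  have hpw : scored.Pairwise (fun a b : Int × String => b.1 ≤ a.1) :=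
    pv_sorted2_rev_fst_pairwise ps
  set st := pvScan orig.toList (c1 :: cs) (f c0, c0, 1) with hst
  obtain ⟨hmax, hmem, hval, hcnt⟩ :=
    pvScan_inv orig.toList (c1 :: cs) [c0] (f c0) c0 1
      (by intro x hx; simp at hx; subst hx; exact le_rfl) (by simp) (by simp [hf]) (by simp [hf])
  -- scored has at least two elements
  have hlen : scored.length = LL.length := by
    rw [hperm.length_eq, hps, List.length_map]
  match hsc : scored with
  | [] => simp [hLL] at hlen
  | [p] => simp [hLL] at hlen
  | (s0, d0) :: (s1, d1) :: rest =>
    -- every pair of ps has fst ≤ s0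
    have hhead : ∀ y ∈ ps, y.1 ≤ s0 := by
      intro y hy
      have hy' : y ∈ (s0, d0) :: (s1, d1) :: rest := (hperm.mem_iff).mpr hy
      rcases List.mem_cons.mp hy' with rfl | hy'
      · exact le_rfl
      · exact (List.pairwise_cons.mp hpw).1 y hy'
    -- s0 = st.1 (both are the maximum score)
    have hs0mem : (s0, d0) ∈ ps := (hperm.mem_iff).mp (by simp)
    have hs0L : ∃ c ∈ LL, (f c, c) = (s0, d0) := by
      rcases List.mem_map.mp hs0mem with ⟨c, hc, hcv⟩; exact ⟨c, hc, hcv⟩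
    obtain ⟨cw, hcwL, hcw⟩ := hs0L
    have hcwf : f cw = s0 := by injection hcw
    have hcwd : cw = d0 := by injection hcw
    have hstmem : (f st.2.1, st.2.1) ∈ ps := List.mem_map.mpr ⟨st.2.1, hmem, rfl⟩
    have hs0_eq : s0 = st.1 := by
      have h1 : s0 ≤ st.1 := hcwf ▸ hmax cw hcwL
      have h2 : st.1 ≤ s0 := hval ▸ hhead _ hstmem
      omega
    -- count over ps of (fst = s0) equals count over LL of (f = s0)
    have hcount_ps : ps.countP (fun p => p.1 = s0) = LL.countP (fun c => f c = s0) := by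
      rw [hps, List.countP_map]; rfl
    have hcnt' : st.2.2 = (LL.countP (fun x => f x = s0) : Int) := by
      rw [hcnt, hs0_eq]; rfl
    by_cases htie : s0 = s1
    · -- tie: the top score occurs at least twice
      have h2le : 2 ≤ LL.countP (fun x => f x = s0) := by
        have : 2 ≤ ((s0, d0) :: (s1, d1) :: rest).countP (fun p => p.1 = s0) := by
          simp only [List.countP_cons]
          have h0 : (decide ((s0, d0).1 = s0)) = true := by simp
          have h1 : (decide ((s1, d1).1 = s0)) = true := by simp [htie]
          simp [h1]
        calc 2 ≤ ((s0, d0) :: (s1, d1) :: rest).countP (fun p => p.1 = s0) := this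
          _ = ps.countP (fun p => p.1 = s0) := hperm.countP_eq _
          _ = LL.countP (fun c => f c = s0) := hcount_ps
      have : 2 ≤ st.2.2 := by rw [hcnt']; exact_mod_cast h2le
      simp [htie, this]
    · -- no tie: the maximum is unique, and both sides name the same candidate
      have hs1mem : (s1, d1) ∈ ps := (hperm.mem_iff).mp (by simp)
      have hs1le : s1 ≤ s0 := hhead _ hs1mem
      have hcount1 : LL.countP (fun x => f x = s0) = 1 := by
        have hrest : ∀ y ∈ rest, y.1 ≤ s1 := by
          have := List.pairwise_cons.mp (List.pairwise_cons.mp hpw).2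
          exact this.1
        have : ((s0, d0) :: (s1, d1) :: rest).countP (fun p => p.1 = s0) = 1 := by
          simp only [List.countP_cons]
          have h0 : (decide ((s0, d0).1 = s0)) = true := by simp
          have h1 : (decide ((s1, d1).1 = s0)) = false := by
            simp only [decide_eq_false_iff_not]; exact fun h => htie h.symm
          have hr : rest.countP (fun p => p.1 = s0) = 0 := by
            refine List.countP_eq_zero.mpr ?_
            intro y hy
            have := hrest y hy
            simp only [decide_eq_true_eq]
            omega
          simp [h1, hr]
        rw [← hcount_ps, ← hperm.countP_eq _, this]
      have hnot2 : ¬ 2 ≤ st.2.2 := by rw [hcnt', hcount1]; omega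
      -- uniqueness of the maximal candidate
      have hpos1 : LL.countP (fun x => f x = s0) ≤ 1 := le_of_eq hcount1
      have huniq : st.2.1 = cw := by
        by_contra hne
        have h2 : 2 ≤ LL.countP (fun x => f x = s0) :=
          pv_two_le_countP _ LL st.2.1 cw hmem hcwL
            (by simp only [decide_eq_true_eq, hf]; rw [hs0_eq]; exact hval)
            (by simp only [decide_eq_true_eq]; exact hcwf) hne
        omega
      have : st.2.1 = d0 := huniq.trans hcwd
      simp [htie, hnot2, this]

-- ===== VERDICT (by name: the statement is the Claim_ definition above) =====
theorem resolve_aadr_iid_spec : Claim_equal_resolve_aadr_iid := by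
  intro sample_iid iid_to_index canonical_to_ids _ _
  unfold Spec_resolve_aadr_iid resolve_aadr_iid resolve_aadr_iid_alt
  rw [PySem.Dict.contains_eq_isSome_get?]
  cases hk : (PySem.Dict.mk iid_to_index).get? sample_iid with
  | some idx => simp
  | none =>
    simp only [Option.isSome_none, Bool.false_eq_true, if_false]
    cases hc : (PySem.Dict.mk canonical_to_ids).getD (String.ofList (pvCanonical sample_iid)) [] with
    | nil => rfl
    | cons c0 rest =>
      cases rest with
      | nil => rfl
      | cons c1 cs =>
        dsimp only
        rw [if_neg (by simp : ¬(c1 :: cs = []))]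
        exact pv_branch_eq sample_iid c0 c1 cs
          (fun c => (PySem.Dict.mk iid_to_index).get? c)
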